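-- pv_equiv track=rewrite | github.com/firststep430/Python-Algorithm | 프로그래머스/1/12922. 수박수박수박수박수박수？/수박수박수박수박수박수？.py | solution
-- ===== SOURCE A (Python) =====
-- def solution(n):
--     temp_odd = "박"
--     temp_even = "수"
--     answer = ""
--     for i in range(n):
--         if i % 2 != 0:
--             answer = answer + temp_odd
--         else:
--             answer = answer + temp_even
--
--     return answer
-- ===== SOURCE B (Python) =====
-- def solution(n):
--     return ("수박" * ((n + 1) // 2))[:n]
-- ===== Notes on version B (the rewrite author's own statement) =====
-- stated objective: idiomatic
-- what changed: Replaces the per-character loop with a closed-form construction: repeat the unit '수박' ceil(n/2) times and slice to length n, with no accumulator or parity branch.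
import Mathlib
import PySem

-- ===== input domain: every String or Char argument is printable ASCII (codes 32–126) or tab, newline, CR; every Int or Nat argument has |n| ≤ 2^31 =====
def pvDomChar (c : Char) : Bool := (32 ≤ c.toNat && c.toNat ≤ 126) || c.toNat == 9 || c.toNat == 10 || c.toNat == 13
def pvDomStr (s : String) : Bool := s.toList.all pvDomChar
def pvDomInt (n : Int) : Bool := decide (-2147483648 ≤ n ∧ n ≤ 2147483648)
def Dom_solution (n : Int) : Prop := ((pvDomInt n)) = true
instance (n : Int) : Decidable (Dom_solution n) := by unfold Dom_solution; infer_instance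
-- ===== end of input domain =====

-- B replaces A's per-character accumulation loop with a closed-form build: repeat "수박" ceil(n/2) times and slice to length n (idiomatic).

-- ===== PORT A =====
-- loop: for i in range(n): answer += '박' if i odd else '수'
def solution (n : Int) : String :=
  String.ofList <|
    (PySem.List.pyRange 0 n 1).foldl
      (fun answer i =>
        if PySem.Int.mod i 2 ≠ 0 then answer ++ ['박'] else answer ++ ['수'])
      []

-- ===== PORT B =====
-- ("수박" * ((n + 1) // 2))[:n]
def solution_alt (n : Int) : String :=
  String.ofList <|
    PySem.List.slice
      (List.flatten (List.replicate (PySem.Int.floordiv (n + 1) 2).toNat ['수', '박']))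
      none (some n)

-- ===== PRECONDITION & SPEC =====
def Spec_solution (n : Int) (out : String) : Prop := out = solution_alt n
instance (n : Int) (out : String) : Decidable (Spec_solution n out) := by unfold Spec_solution; infer_instance

-- ===== CLAIM (what is proved, stated in full; the proofs are below) =====
def Claim_equal_solution : Prop := ∀ (n : Int), Dom_solution n → Spec_solution n (solution n)

-- ===== LEMMAS AND PROOFS =====

-- the common pattern: character at position i
def pvPat (m : Nat) : List Char :=
  (List.range m).map (fun i => if i % 2 = 1 then '박' else '수')

lemma pvLoop_eq_pat (m : Nat) :
    (PySem.List.pyRange 0 (m : Int) 1).foldl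
      (fun answer i =>
        if PySem.Int.mod i 2 ≠ 0 then answer ++ ['박'] else answer ++ ['수'])
      [] = pvPat m := by
  induction m with
  | zero => simp [pvPat, PySem.List.pyRange_one_eq_nil]
  | succ k ih =>
      have h : ((k : Int) + 1) = ((k + 1 : Nat) : Int) := by push_cast; ring
      rw [pvPat, List.range_succ, List.map_append, ← pvPat, ← ih]
      rw [show ((k + 1 : Nat) : Int) = (k : Int) + 1 by push_cast; ring]
      rw [PySem.List.pyRange_one_succ_right (by positivity), List.foldl_append]
      simp only [List.foldl_cons, List.foldl_nil, List.map_cons, List.map_nil]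
      have hmod : PySem.Int.mod (k : Int) 2 = ((k % 2 : Nat) : Int) := by
        exact_mod_cast PySem.Int.mod_natCast k 2
      rcases Nat.mod_two_eq_zero_or_one k with hk | hk <;> simp only [hmod, hk] <;> simp

lemma pvFlatten_replicate (k : Nat) :
    List.flatten (List.replicate k ['수', '박']) = pvPat (2 * k) := by
  induction k with
  | zero => simp [pvPat]
  | succ j ih =>
      rw [List.replicate_succ', List.flatten_append, ih]
      have h2 : 2 * (j + 1) = (2 * j + 1) + 1 := by ring
      rw [h2]
      simp only [pvPat, List.range_succ, List.map_append, List.map_cons, List.map_nil]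
      have e1 : (2 * j) % 2 = 0 := Nat.mul_mod_right 2 j
      have e2 : (2 * j + 1) % 2 = 1 := by omega
      simp [e1, e2, List.append_assoc]

lemma pvPat_take (m k : Nat) (h : m ≤ k) : (pvPat k).take m = pvPat m := by
  simp [pvPat, ← List.map_take, List.take_range, Nat.min_eq_left h]

-- ===== VERDICT (by name: the statement is the Claim_ definition above) =====
theorem solution_spec : Claim_equal_solution := by
  unfold Claim_equal_solution
  intro n _
  unfold Spec_solution solution solution_alt
  by_cases hn : 0 < n
  case neg =>
    have hn' : n ≤ 0 := by omega
    have hr : PySem.List.pyRange 0 n 1 = [] := PySem.List.pyRange_one_eq_nil hn'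
    rw [hr, PySem.Int.floordiv_eq_ediv_of_pos (by omega)]
    have h0 : ((n + 1) / 2).toNat = 0 := by omega
    rw [h0]
    simp [PySem.List.slice]
  case pos =>
    obtain ⟨m, rfl⟩ : ∃ m : Nat, n = (m : Int) := ⟨n.toNat, by omega⟩
    rw [pvLoop_eq_pat]
    have hfd : (PySem.Int.floordiv ((m : Int) + 1) 2).toNat = (m + 1) / 2 := by
      have := PySem.Int.floordiv_eq_ediv_of_pos (a := (m : Int) + 1) (b := 2) (by omega)
      rw [this]; omega
    rw [hfd, pvFlatten_replicate,
      PySem.List.slice_to (xs := pvPat (2 * ((m + 1) / 2))) (b := (m : Int)) (by omega)]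
    rw [show ((m : Int)).toNat = m from Int.toNat_natCast m]
    rw [pvPat_take m (2 * ((m + 1) / 2)) (by omega)]
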